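-- pv_equiv track=rewrite | github.com/julipup/university-labs | lab_05/tasks1-3.py | amoeba_count
-- ===== SOURCE A (Python) =====
-- def amoeba_count(hours: int):
--     # Checking
--     if hours <= 0 or hours > 24:
--         raise "Error: hours number isn't in range from 0 to 24"
--
--     iterations = hours // 3
--     amoeba_sum = 1
--
--     # Progression
--     for i in range(iterations):
--         amoeba_sum *= 2
--
--     return amoeba_sum
-- ===== SOURCE B (Python) =====
-- def amoeba_count(hours: int):
--     # Checking
--     if hours <= 0 or hours > 24:
--         raise "Error: hours number isn't in range from 0 to 24"
--
--     # Closed form: doubling once per completed 3-hour period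
--     return 2 ** (hours // 3)
-- ===== Notes on version B (the rewrite author's own statement) =====
-- stated objective: simpler
-- what changed: Replaced the doubling loop with the closed-form 2 ** (hours // 3), keeping the same validation guard.
import Mathlib
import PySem

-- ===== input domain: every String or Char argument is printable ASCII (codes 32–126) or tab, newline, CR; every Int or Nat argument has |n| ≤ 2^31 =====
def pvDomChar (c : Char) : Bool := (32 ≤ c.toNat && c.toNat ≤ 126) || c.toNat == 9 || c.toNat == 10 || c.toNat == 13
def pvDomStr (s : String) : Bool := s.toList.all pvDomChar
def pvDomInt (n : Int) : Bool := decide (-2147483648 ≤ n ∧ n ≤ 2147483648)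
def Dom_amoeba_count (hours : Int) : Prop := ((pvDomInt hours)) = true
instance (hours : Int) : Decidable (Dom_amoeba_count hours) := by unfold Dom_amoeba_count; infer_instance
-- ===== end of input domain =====

-- B replaces A's doubling loop by the closed form 2 ** (hours // 3); same guard, same values.

-- ===== PORT A =====
-- for i in range(iterations): amoeba_sum *= 2   (literal fold over the range)
def amoeba_count (hours : Int) : Int :=
  let iterations := PySem.Int.floordiv hours 3
  (PySem.List.pyRange 0 iterations 1).foldl (fun amoeba_sum _ => amoeba_sum * 2) 1

-- ===== PORT B =====
def amoeba_count_alt (hours : Int) : Int :=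
  2 ^ (PySem.Int.floordiv hours 3).toNat

-- ===== PRECONDITION & SPEC =====
-- A raises (a string, hence TypeError) when hours <= 0 or hours > 24; exactly those inputs are excluded.
def Pre_amoeba_count (hours : Int) : Prop := 0 < hours ∧ hours ≤ 24
instance (hours : Int) : Decidable (Pre_amoeba_count hours) := by unfold Pre_amoeba_count; infer_instance
def pvWitness_amoeba_count : Int := (7)
def Spec_amoeba_count (hours : Int) (out : Int) : Prop := out = amoeba_count_alt hours
instance (hours : Int) (out : Int) : Decidable (Spec_amoeba_count hours out) := by unfold Spec_amoeba_count; infer_instance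

-- ===== CLAIM (what is proved, stated in full; the proofs are below) =====
def Claim_equal_amoeba_count : Prop := ∀ (hours : Int), Dom_amoeba_count hours → Pre_amoeba_count hours → Spec_amoeba_count hours (amoeba_count hours)

-- ===== LEMMAS AND PROOFS =====

-- ===== VERDICT (by name: the statement is the Claim_ definition above) =====
theorem amoeba_count_spec : Claim_equal_amoeba_count := by
  intro hours _ hpre
  obtain ⟨h1, h2⟩ := hpre
  unfold Spec_amoeba_count
  interval_cases hours <;> decide
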